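-- pv_equiv track=rewrite | github.com/mggg/PRVTP | Scottish/slate_emd.py | slate_detect_adj
-- ===== SOURCE A (Python) =====
-- def slate_detect_adj(s1: tuple, s2: tuple, n_cands: int) -> bool:
--     """
--     Determines if two rankings are adjacent in the slate ballot graph.
--
--     Two nodes in the slate graph are considered adjacent if one of the following conditions is met:
--         1. The two rankings vary by a swap (e.g., (A,A,B,B) and (A,B,A,B))
--         2. The two, non-full rankings vary by a deletion (e.g., (A,A,B,) and (A,A) but not
--             (A,A,B) and (A,A,B,B))
--         3. One full ranking varies form another ranking by 2 deletions (e.g., (A,A,B,B) and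
--             (A,A,))
--         4. The rankings are not identical (no self-loops)
--             i. A full ranking is considered identical to a ranking of length n_cands - 1 if the
--                 rankings are equivalent when truncated (e.g. the rankings (A,A,B,B) and (A,A,B) are
--                 identical in a 4-candidate election with 2 candidates per slate)
--
--     Args:
--         s1 (tuple): First ranking.
--         s2 (tuple): Second ranking.
--         n_cands (int): Number of candidates in the election.
--
--     Returns:
--         bool: True if the rankings are adjacent in the slate ballot graph, False otherwise.
--
--     Raises:
--         ValueError: If the rankings are not tuples.
--         ValueError: If the rankings vary by a single deletion and one of the rankings is a
--             full ranking. The ranking missing a candidate is equivalent to the full ranking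
--             and should not have been passed to this function.
--     """
--
--     if not isinstance(s1, tuple) or not isinstance(s2, tuple):
--         raise ValueError("s1 and s2 must be tuples")
--
--     if s1 == s2:
--         return False  # Not adjacent. Identical slates
--
--     if abs(len(s1) - len(s2)) == 1:
--         if len(s1) == n_cands or len(s2) == n_cands:
--             raise ValueError(
--                 f"Invalid node for ballot graph with {n_cands} candidates. Found {s1} and {s2}. "
--                 f"All rankings in the ballot graph must be of length exactly {n_cands} "
--                 f"or of length <= {n_cands - 2}"
--             )
--
--         return s1 == s2[:-1] or s2 == s1[:-1]
--
--     if abs(len(s1) - len(s2)) == 2 and (len(s1) == n_cands or len(s2) == n_cands):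
--         if len(s1) < len(s2):
--             return s1 == s2[:-2]
--
--         return s2 == s1[:-2]
--
--     if len(s1) != len(s2):
--         return False
--
--     for i in range(len(s1) - 1):
--         tmp = list(s1)
--         tmp[i], tmp[i + 1] = tmp[i + 1], tmp[i]
--         if tuple(tmp) == s2:
--             return True
--
--     return False
-- ===== SOURCE B (Python) =====
-- def slate_detect_adj(s1: tuple, s2: tuple, n_cands: int) -> bool:
--     if s1 == s2:
--         return False  # no self-loops
--     diff = abs(len(s1) - len(s2))
--     longer, shorter = (s1, s2) if len(s1) > len(s2) else (s2, s1)
--     if diff == 1: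
--         return shorter == longer[:-1]
--     if diff == 2 and n_cands in (len(s1), len(s2)):
--         return shorter == longer[:-2]
--     if diff != 0:
--         return False
--     # equal lengths: adjacent iff exactly one adjacent transposition turns s1 into s2.
--     # Single pass: walk to the first mismatch, then check the swap and the common suffix.
--     i = 0
--     while s1[i] == s2[i]:
--         i += 1
--     return (i + 1 < len(s1) and s1[i] == s2[i + 1] and s1[i + 1] == s2[i]
--             and s1[i + 2:] == s2[i + 2:])
-- ===== Notes on version B (the rewrite author's own statement) =====
-- stated objective: faster
-- what changed: The equal-length case now makes a single pass to the first mismatch and checks one adjacent transposition plus an equal suffix, instead of rebuilding and comparing a swapped copy of the whole list for every index.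
import Mathlib
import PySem

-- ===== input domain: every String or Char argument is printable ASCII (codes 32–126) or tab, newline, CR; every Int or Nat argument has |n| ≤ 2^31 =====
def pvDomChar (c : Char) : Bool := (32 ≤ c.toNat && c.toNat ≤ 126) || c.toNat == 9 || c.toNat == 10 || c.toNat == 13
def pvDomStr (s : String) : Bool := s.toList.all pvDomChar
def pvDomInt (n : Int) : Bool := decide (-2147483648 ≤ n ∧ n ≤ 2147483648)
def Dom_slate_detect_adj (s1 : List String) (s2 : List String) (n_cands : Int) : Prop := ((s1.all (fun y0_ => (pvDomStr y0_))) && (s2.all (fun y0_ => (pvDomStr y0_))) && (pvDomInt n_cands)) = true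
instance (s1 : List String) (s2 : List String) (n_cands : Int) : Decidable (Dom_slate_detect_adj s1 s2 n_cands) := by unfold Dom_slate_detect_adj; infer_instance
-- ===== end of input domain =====

-- B replaces A's quadratic try-every-adjacent-swap loop in the equal-length case by a single
-- pass to the first mismatch (measured faster, asymptotic mechanism); return values only.

-- ===== PORT A =====
-- tmp = list(s1); tmp[i], tmp[i+1] = tmp[i+1], tmp[i]
def pvSwapAt (l : List String) (i : Nat) : List String :=
  match l[i]?, l[i+1]? with
  | some a, some b => (l.set i b).set (i+1) a
  | _, _ => l

-- "for i in range(len(s1)-1): … if tuple(tmp) == s2: return True" / "return False"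
def pvALoop (s1 s2 : List String) : List Nat → Bool
  | [] => false
  | i :: rest => if pvSwapAt s1 i = s2 then true else pvALoop s1 s2 rest

-- xs[:-1] is ported as List.dropLast (exact: Python drops the last element, empty → empty);
-- xs[:-2] as dropLast twice (exact likewise).
def slate_detect_adj (s1 : List String) (s2 : List String) (n_cands : Int) : Bool :=
  if s1 = s2 then false
  else if ((s1.length : Int) - (s2.length : Int)).natAbs = 1 then
    if (s1.length : Int) = n_cands ∨ (s2.length : Int) = n_cands then
      false  -- Python raises ValueError here; these inputs are excluded by Pre_
    else decide (s1 = s2.dropLast ∨ s2 = s1.dropLast)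
  else if ((s1.length : Int) - (s2.length : Int)).natAbs = 2 ∧
          ((s1.length : Int) = n_cands ∨ (s2.length : Int) = n_cands) then
    if s1.length < s2.length then decide (s1 = s2.dropLast.dropLast)
    else decide (s2 = s1.dropLast.dropLast)
  else if s1.length ≠ s2.length then false
  else pvALoop s1 s2 (List.range (s1.length - 1))

-- ===== PORT B =====
-- "i = 0; while s1[i] == s2[i]: i += 1" followed by the swap-and-suffix check, as the
-- structural recursion on the two lists: equal heads recurse; at the first mismatch the
-- cons-cons match is Python's "i + 1 < len(s1)" guard and the three comparisons.
def pvBStep : List String → List String → Bool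
  | x :: xs, y :: ys =>
    if x = y then pvBStep xs ys
    else match xs, ys with
      | a :: t, b :: u => decide (x = b ∧ a = y ∧ t = u)
      | _, _ => false
  | _, _ => false

def slate_detect_adj_alt (s1 : List String) (s2 : List String) (n_cands : Int) : Bool :=
  if s1 = s2 then false
  else
    let diff := ((s1.length : Int) - (s2.length : Int)).natAbs
    if diff = 1 then
      if s1.length > s2.length then decide (s2 = s1.dropLast) else decide (s1 = s2.dropLast)
    else if diff = 2 ∧ ((s1.length : Int) = n_cands ∨ (s2.length : Int) = n_cands) then
      if s1.length > s2.length then decide (s2 = s1.dropLast.dropLast)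
      else decide (s1 = s2.dropLast.dropLast)
    else if diff ≠ 0 then false
    else pvBStep s1 s2

-- ===== PRECONDITION & SPEC =====
-- Pre_ excludes exactly the inputs on which A raises ValueError: lengths differing by 1
-- with one of the two rankings of full length n_cands.
def Pre_slate_detect_adj (s1 : List String) (s2 : List String) (n_cands : Int) : Prop :=
  ¬ (((s1.length : Int) - (s2.length : Int)).natAbs = 1 ∧
     ((s1.length : Int) = n_cands ∨ (s2.length : Int) = n_cands))
instance (s1 : List String) (s2 : List String) (n_cands : Int) : Decidable (Pre_slate_detect_adj s1 s2 n_cands) := by unfold Pre_slate_detect_adj; infer_instance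

def pvWitness_slate_detect_adj : List String × List String × Int := (["A", "B"], ["B", "A"], 2)

def Spec_slate_detect_adj (s1 : List String) (s2 : List String) (n_cands : Int) (out : Bool) : Prop := out = slate_detect_adj_alt s1 s2 n_cands
instance (s1 : List String) (s2 : List String) (n_cands : Int) (out : Bool) : Decidable (Spec_slate_detect_adj s1 s2 n_cands out) := by unfold Spec_slate_detect_adj; infer_instance

-- ===== CLAIM (what is proved, stated in full; the proofs are below) =====
def Claim_equal_slate_detect_adj : Prop := ∀ (s1 : List String) (s2 : List String) (n_cands : Int), Dom_slate_detect_adj s1 s2 n_cands → Pre_slate_detect_adj s1 s2 n_cands → Spec_slate_detect_adj s1 s2 n_cands (slate_detect_adj s1 s2 n_cands)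


-- ===== LEMMAS AND PROOFS =====

theorem pvSwapAt_succ (x : String) (l : List String) (i : Nat) :
    pvSwapAt (x :: l) (i + 1) = x :: pvSwapAt l i := by
  unfold pvSwapAt
  cases h1 : l[i]? <;> cases h2 : l[i+1]? <;> simp [h1, h2]

theorem pvSwapAt_zero_cons (x a : String) (t : List String) :
    pvSwapAt (x :: a :: t) 0 = a :: x :: t := by
  simp [pvSwapAt]

theorem pvALoop_map_succ_eq (x : String) (xs ys : List String) (is : List Nat) :
    pvALoop (x :: xs) (x :: ys) (is.map (· + 1)) = pvALoop xs ys is := by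
  induction is with
  | nil => simp [pvALoop]
  | cons i rest ih =>
    simp only [List.map_cons, pvALoop, pvSwapAt_succ]
    by_cases h : pvSwapAt xs i = ys
    · simp [h]
    · simp [h, ih]

theorem pvALoop_map_succ_false (x y : String) (xs ys : List String) (is : List Nat)
    (hxy : ¬ x = y) : pvALoop (x :: xs) (y :: ys) (is.map (· + 1)) = false := by
  induction is with
  | nil => simp [pvALoop]
  | cons i rest ih =>
    simp only [List.map_cons, pvALoop, pvSwapAt_succ]
    simp [hxy, ih]

theorem pvRange_succ_shape (n : Nat) :
    List.range (n + 1) = 0 :: (List.range n).map (· + 1) := by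
  rw [List.range_succ_eq_map]

theorem pvBStep_cons_eq (x : String) (xs ys : List String) :
    pvBStep (x :: xs) (x :: ys) = pvBStep xs ys := by
  simp [pvBStep]

-- the heart of the file: A's try-every-adjacent-swap loop equals B's first-mismatch check
-- on unequal lists of equal length
theorem pvLoop_eq_step : ∀ (s1 s2 : List String), s1.length = s2.length → s1 ≠ s2 →
    pvALoop s1 s2 (List.range (s1.length - 1)) = pvBStep s1 s2 := by
  intro s1
  induction s1 with
  | nil =>
    intro s2 hl hne
    cases s2 with
    | nil => exact absurd rfl hne
    | cons y ys => exact absurd hl (by simp)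
  | cons x xs ih =>
    intro s2 hl hne
    cases s2 with
    | nil => exact absurd hl (by simp)
    | cons y ys =>
      have hl' : xs.length = ys.length := by simpa using hl
      by_cases hxy : x = y
      · -- equal heads: index 0 never fires, the rest is the tail loop
        subst hxy
        have hts : xs ≠ ys := fun h => hne (by rw [h])
        cases xs with
        | nil =>
          cases ys with
          | nil => exact absurd rfl hts
          | cons b u => exact absurd hl' (by simp)
        | cons a t =>
          cases ys with
          | nil => exact absurd hl' (by simp)
          | cons b u =>
            have hr : List.range ((x :: a :: t).length - 1)
                = 0 :: (List.range t.length).map (· + 1) := by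
              simp only [List.length_cons, Nat.add_sub_cancel]
              exact pvRange_succ_shape t.length
            rw [hr, pvBStep_cons_eq]
            show (if pvSwapAt (x :: a :: t) 0 = x :: b :: u then true
                  else pvALoop (x :: a :: t) (x :: b :: u) ((List.range t.length).map (· + 1)))
                = pvBStep (a :: t) (b :: u)
            have h0 : pvSwapAt (x :: a :: t) 0 ≠ x :: b :: u := by
              rw [pvSwapAt_zero_cons]
              intro h
              apply hts
              injection h with h1 h2
              injection h2 with h21 h22
              subst h1; subst h21; subst h22; rfl
            rw [if_neg h0, pvALoop_map_succ_eq]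
            have := ih (b :: u) (by simpa using hl') hts
            simpa using this
      · -- first mismatch at the head: only the index-0 swap can work
        cases xs with
        | nil =>
          cases ys with
          | nil => simp [pvALoop, pvBStep, hxy]
          | cons b u => exact absurd hl' (by simp)
        | cons a t =>
          cases ys with
          | nil => exact absurd hl' (by simp)
          | cons b u =>
            have hr : List.range ((x :: a :: t).length - 1)
                = 0 :: (List.range t.length).map (· + 1) := by
              simp only [List.length_cons, Nat.add_sub_cancel]
              exact pvRange_succ_shape t.length
            rw [hr]
            show (if pvSwapAt (x :: a :: t) 0 = y :: b :: u then true
                  else pvALoop (x :: a :: t) (y :: b :: u) ((List.range t.length).map (· + 1)))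
                = pvBStep (x :: a :: t) (y :: b :: u)
            rw [pvSwapAt_zero_cons, pvALoop_map_succ_false x y _ _ _ hxy]
            have hb : pvBStep (x :: a :: t) (y :: b :: u)
                = decide (x = b ∧ a = y ∧ t = u) := by
              simp [pvBStep, hxy]
            rw [hb]
            by_cases h : a :: x :: t = y :: b :: u
            · obtain ⟨h1, h2, h3⟩ : a = y ∧ x = b ∧ t = u := by simpa using h
              simp [h1, h2, h3]
            · have hnot : ¬ (x = b ∧ a = y ∧ t = u) := by
                rintro ⟨e1, e2, e3⟩
                exact h (by rw [e1, e2, e3])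
              simp [h, hnot]

theorem slate_main (s1 s2 : List String) (n_cands : Int)
    (hpre : Pre_slate_detect_adj s1 s2 n_cands) :
    slate_detect_adj s1 s2 n_cands = slate_detect_adj_alt s1 s2 n_cands := by
  unfold slate_detect_adj slate_detect_adj_alt Pre_slate_detect_adj at *
  by_cases heq : s1 = s2
  · simp [heq]
  · simp only [if_neg heq]
    by_cases h1 : ((s1.length : Int) - (s2.length : Int)).natAbs = 1
    · have hful : ¬ ((s1.length : Int) = n_cands ∨ (s2.length : Int) = n_cands) :=
        fun h => hpre ⟨h1, h⟩
      simp only [h1, if_neg hful, if_pos]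
      by_cases hgt : s1.length > s2.length
      · have hlen : s1.length = s2.length + 1 := by omega
        have hno : s1 ≠ s2.dropLast := by
          intro h
          have := congrArg List.length h
          rw [List.length_dropLast] at this
          omega
        simp [hgt, hno]
      · have hlen : s2.length = s1.length + 1 := by omega
        have hno : s2 ≠ s1.dropLast := by
          intro h
          have := congrArg List.length h
          rw [List.length_dropLast] at this
          omega
        simp [hgt, hno]
    · simp only [if_neg h1]
      by_cases h2 : ((s1.length : Int) - (s2.length : Int)).natAbs = 2 ∧
          ((s1.length : Int) = n_cands ∨ (s2.length : Int) = n_cands)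
      · obtain ⟨h2a, h2b⟩ := h2
        by_cases hlt : s1.length < s2.length
        · have hgt : ¬ s1.length > s2.length := by omega
          simp [h2a, h2b, hlt, hgt]
        · have hgt : s1.length > s2.length := by omega
          simp [h2a, h2b, hlt, hgt]
      · simp only [if_neg h2]
        by_cases hlen : s1.length = s2.length
        · have h0 : ((s1.length : Int) - (s2.length : Int)).natAbs = 0 := by omega
          have hA : ¬ s1.length ≠ s2.length := by omega
          simp only [h0, if_neg hA]
          rw [if_neg (by simp : ¬ ((0 : Nat) ≠ 0))]
          exact pvLoop_eq_step s1 s2 hlen heq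
        · have h0 : ((s1.length : Int) - (s2.length : Int)).natAbs ≠ 0 := by omega
          simp [hlen, h0]

-- ===== VERDICT (by name: the statement is the Claim_ definition above) =====
theorem slate_detect_adj_spec : Claim_equal_slate_detect_adj := by
  intro s1 s2 n_cands _ hpre
  unfold Spec_slate_detect_adj
  exact slate_main s1 s2 n_cands hpre
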